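-- pv_equiv track=rewrite | github.com/MironovM/HWprog | HW7/HW7.py | otsi
-- ===== SOURCE A (Python) =====
-- def otsi(text):
--     dic = {}
--     for word in text:
--         if word[-4:] == 'ness':
--             if word in dic:
--                 dic[word] += 1
--             else:
--                 dic[word] = 1
--     return dic
-- ===== SOURCE B (Python) =====
-- def otsi(text):
--     qual = [w for w in text if w.endswith('ness')]
--
--     def go(ws):
--         if not ws:
--             return {}
--         w = ws[0]
--         out = {w: ws.count(w)}
--         out.update(go([x for x in ws[1:] if x != w]))
--         return out
--
--     return go(qual)
-- ===== Notes on version B (the rewrite author's own statement) =====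
-- stated objective: alternative
-- what changed: Replaces A's single-pass dict tally with a recursive count-and-remove scheme: filter the 'ness' words, then repeatedly take the first remaining word, count all its occurrences at once, delete them from the list, and recurse on what is left.
import Mathlib
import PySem

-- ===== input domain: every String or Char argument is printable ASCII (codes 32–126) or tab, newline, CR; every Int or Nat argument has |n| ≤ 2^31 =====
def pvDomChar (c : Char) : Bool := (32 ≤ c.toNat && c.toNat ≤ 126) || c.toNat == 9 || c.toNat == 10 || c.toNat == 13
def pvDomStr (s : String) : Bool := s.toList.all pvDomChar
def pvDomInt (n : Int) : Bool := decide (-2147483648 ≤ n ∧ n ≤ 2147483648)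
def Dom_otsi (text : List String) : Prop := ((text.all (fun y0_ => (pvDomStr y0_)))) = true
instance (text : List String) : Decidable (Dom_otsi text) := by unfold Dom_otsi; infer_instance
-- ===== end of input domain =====

-- B replaces A's single-pass dict tally with recursive count-and-remove on the filtered list (alternative decomposition, not faster).

-- ===== PORT A =====
def otsi (text : List String) : List (String × Int) :=
  (text.foldl (fun dic word =>
    if PySem.Str.slice word (some (-4)) none == "ness" then
      if dic.contains word then dic.insert word (dic.getD word 0 + 1)
      else dic.insert word 1
    else dic) PySem.Dict.empty).items

-- ===== PORT B =====
-- B's helper go: first word, its total count, then recurse on the list with all its copies removed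
def otsiGo (ws : List String) : List (String × Int) :=
  match ws with
  | [] => []
  | w :: rest => (w, ((w :: rest).count w : Int)) :: otsiGo (rest.filter (fun x => x ≠ w))
termination_by ws.length
decreasing_by
  simp only [List.length_cons, List.length_unattach]
  exact Nat.lt_succ_of_le (le_trans (List.length_filter_le _ _) (by simp))

def otsi_alt (text : List String) : List (String × Int) :=
  otsiGo (text.filter (fun w => PySem.Str.endswith w "ness"))

-- ===== PRECONDITION & SPEC =====
def Spec_otsi (text : List String) (out : List (String × Int)) : Prop := out = otsi_alt text
instance (text : List String) (out : List (String × Int)) : Decidable (Spec_otsi text out) := by unfold Spec_otsi; infer_instance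

-- ===== CLAIM (what is proved, stated in full; the proofs are below) =====
def Claim_equal_otsi : Prop := ∀ (text : List String), Dom_otsi text → Spec_otsi text (otsi text)

-- ===== LEMMAS AND PROOFS =====

-- A's slice test word[-4:] == 'ness' is exactly word.endswith('ness')
theorem slice_eq_endswith (w : String) :
    (PySem.Str.slice w (some (-4)) none == "ness") = PySem.Str.endswith w "ness" := by
  simp only [PySem.Str.slice, PySem.Str.endswith, PySem.Chars.endswith, PySem.Chars.slice]
  rw [PySem.List.slice_from_neg_ofNat w.toList 4 (by norm_num)]
  generalize w.toList = l
  rw [Bool.eq_iff_iff]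
  rw [List.isSuffixOf_iff_suffix, List.suffix_iff_eq_drop]
  simp only [beq_iff_eq, ← String.toList_inj, String.toList_ofList]
  constructor
  · intro h; simpa using h.symm
  · intro h; simpa using h.symm

-- adding elements that avoid a prefix s of the accumulator commutes with that prefix
theorem foldl_add_append (l : List String) (s t : List String) (h : ∀ x ∈ l, x ∉ s) :
    l.foldl PySem.Set.add (s ++ t) = s ++ l.foldl PySem.Set.add t := by
  induction l generalizing t with
  | nil => simp
  | cons x xs ih =>
    have hx : x ∉ s := h x (by simp)
    have hadd : PySem.Set.add (s ++ t) x = s ++ PySem.Set.add t x := by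
      simp [PySem.Set.add, PySem.Set.contains, hx]
      by_cases hxt : x ∈ t <;> simp [hxt]
    simp only [List.foldl_cons, hadd]
    exact ih (PySem.Set.add t x) (fun y hy => h y (List.mem_cons_of_mem _ hy))

-- copies of an element already in the accumulator can be dropped from a foldl of Set.add
theorem foldl_add_erase (l : List String) (s : List String) (x : String) (hx : x ∈ s) :
    l.foldl PySem.Set.add s = (l.filter (fun y => y ≠ x)).foldl PySem.Set.add s := by
  induction l generalizing s with
  | nil => rfl
  | cons y ys ih =>
    by_cases hyx : y = x
    · subst hyx
      have : PySem.Set.add s y = s := by simp [PySem.Set.add, PySem.Set.contains, hx]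
      simp [this, ih s hx]
    · have hmem : x ∈ PySem.Set.add s y := by
        simp [PySem.Set.add, PySem.Set.contains]
        by_cases hys : y ∈ s <;> simp [hys, hx]
      simp [hyx, ih (PySem.Set.add s y) hmem]

-- set(w :: rest) = w :: set(rest with w removed)
theorem ofList_cons_filter (w : String) (rest : List String) :
    PySem.Set.ofList (w :: rest) = w :: PySem.Set.ofList (rest.filter (fun x => x ≠ w)) := by
  have h0 : PySem.Set.ofList (w :: rest) = rest.foldl PySem.Set.add [w] := by
    simp [PySem.Set.ofList_eq_foldl, PySem.Set.add, PySem.Set.contains]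
  rw [h0, foldl_add_erase rest [w] w (by simp)]
  have := foldl_add_append (rest.filter (fun x => x ≠ w)) [w] []
    (by intro x hx; simp at hx; simp [hx.2])
  simpa [PySem.Set.ofList_eq_foldl] using this

-- filtering the attached list then forgetting the proofs is plain filtering
theorem unattach_filter_val (p : String → Bool) (rest : List String) :
    (rest.attach.filter (fun x => p x.1)).unattach = rest.filter p := by
  induction rest with
  | nil => rfl
  | cons x xs ih =>
    rw [List.attach_cons]
    simp only [List.filter_cons, List.filter_map]
    simp only [List.unattach, Function.comp_def] at ih ⊢
    by_cases h : p x
    · simp only [h, if_pos, List.map_cons]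
      simp
    · simp [h]

-- the dedup-and-count map IS B's count-and-remove recursion
theorem map_ofList_eq_go (l : List String) :
    (PySem.Set.ofList l).map (fun k => (k, (l.count k : Int))) = otsiGo l := by
  induction l using otsiGo.induct with
  | case1 => simp [otsiGo, PySem.Set.ofList_eq_foldl]
  | case2 w rest ih =>
    simp at ih
    rw [unattach_filter_val (fun x => !decide (x = w)) rest] at ih
    rw [ofList_cons_filter, otsiGo]
    simp only [List.map_cons, List.cons.injEq, true_and]
    have hfe : rest.filter (fun x => decide (x ≠ w)) = rest.filter (fun x => !decide (x = w)) := by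
      apply List.filter_congr; intro y _; simp
    rw [hfe, ← ih]
    apply List.map_congr_left
    intro k hk
    have hkmem : k ∈ rest.filter (fun x => !decide (x = w)) := by
      have := PySem.Set.mem_ofList (xs := rest.filter (fun x => !decide (x = w))) (y := k)
      tauto
    have hkne : k ≠ w := by
      simp at hkmem; exact hkmem.2
    have hcnt : (w :: rest).count k = (rest.filter (fun x => !decide (x = w))).count k := by
      rw [List.count_cons, List.count_filter] <;> simp [hkne, Ne.symm hkne]
    simp [hcnt]

-- A's loop is Counter of the filtered list; its items are B's recursion
theorem otsi_eq (text : List String) : otsi text = otsi_alt text := by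
  unfold otsi otsi_alt
  simp only [slice_eq_endswith]
  rw [← List.foldl_filter]
  have hfun : (fun (dic : PySem.Dict String Int) word =>
      if dic.contains word then dic.insert word (dic.getD word 0 + 1)
      else dic.insert word 1) =
      (fun (dic : PySem.Dict String Int) word => dic.insert word (dic.getD word 0 + 1)) := by
    funext d w
    by_cases h : d.contains w
    · simp [h]
    · simp only [h]
      have hg : d.get? w = none := by
        have hc := PySem.Dict.contains_eq_isSome_get? (d := d) (k := w)
        rw [hc] at h
        cases heq : d.get? w with
        | none => rfl
        | some v => rw [heq] at h; simp at h
      have : d.getD w 0 = 0 := by simp [PySem.Dict.getD, hg]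
      rw [this]
      norm_num
  rw [hfun, PySem.Dict.foldl_insert_getD_add_one_eq_counter, PySem.Dict.items_counter]
  exact map_ofList_eq_go _

-- ===== VERDICT (by name: the statement is the Claim_ definition above) =====
theorem otsi_spec : Claim_equal_otsi := by
  intro text _
  exact otsi_eq text
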